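-- pv_equiv track=rewrite | github.com/robphoenix/diffios | diffios.py | _group_into_blocks
-- ===== SOURCE A (Python) =====
-- def _group_into_blocks(config):
--     """Group config into hierarchical blocks.
--
--     Blocks are defined as a parent/child relationship,
--     where children lines start with a ' ', and parents
--     are the immediately preceding line that doesn't start
--     with a ' '. Blocks can be single lines where there
--     is no children. Returns the blocks sorted.
--
--     Example Blocks:
--         interface FastEthernet0/1
--          ip address 192.168.0.1 255.255.255.0
--          no shutdown
--
--         hostname ROUTER
--
--     Args:
--         config (list): config as a list of lines.
--
--     Returns:
--         list: config as a sorted list of lists, each list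
--             representing a hierarchical block of config.
--
--     """
--     current_group, groups = [], []
--     for line in config:
--         if not line.startswith(' ') and current_group:
--             groups.append(current_group)
--             current_group = [line]
--         else:
--             current_group.append(line)
--     if current_group:
--         groups.append(current_group)
--     return sorted(groups)
-- ===== SOURCE B (Python) =====
-- def _group_into_blocks(config):
--     """Find each block's extent with an inner indented-line scan over the
--     remaining suffix, slice the block out, and sort the blocks
--     (alternative decomposition to the accumulator fold)."""
--     blocks = []
--     i, n = 0, len(config)
--     while i < n:
--         j = i + 1
--         while j < n and config[j].startswith(' '):
--             j += 1
--         blocks.append(config[i:j])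
--         i = j
--     return sorted(blocks)
-- ===== Notes on version B (the rewrite author's own statement) =====
-- stated objective: alternative
-- what changed: Replaces the single accumulator fold that flushes the current group at each unindented line with an outer loop that finds each block's extent by scanning forward over its indented children and slicing the block out, then sorts.
import Mathlib
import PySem

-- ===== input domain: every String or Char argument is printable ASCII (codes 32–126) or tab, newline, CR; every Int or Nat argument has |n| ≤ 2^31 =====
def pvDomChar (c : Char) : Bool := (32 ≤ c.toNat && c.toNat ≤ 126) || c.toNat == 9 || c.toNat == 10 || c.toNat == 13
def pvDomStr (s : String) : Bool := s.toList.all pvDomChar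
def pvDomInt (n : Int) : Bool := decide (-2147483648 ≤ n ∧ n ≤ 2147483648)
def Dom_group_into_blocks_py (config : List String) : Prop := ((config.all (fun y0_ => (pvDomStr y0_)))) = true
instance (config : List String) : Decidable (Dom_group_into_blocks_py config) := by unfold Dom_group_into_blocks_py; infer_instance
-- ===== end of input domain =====

-- B differs from A by decomposition only: A folds with a current-group accumulator,
-- B slices each block off the front after scanning its indented children; same sorted result.

-- ===== PORT A =====
-- the loop body of A's 'for line in config', state = (current_group, groups)
def pvAStep (st : List String × List (List String)) (line : String) :
    List String × List (List String) :=
  if ¬ PySem.Str.startswith line " " ∧ st.1 ≠ [] then ([line], st.2 ++ [st.1])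
  else (st.1 ++ [line], st.2)

-- A's post-loop flush: 'if current_group: groups.append(current_group)'
def pvFinish (st : List String × List (List String)) : List (List String) :=
  if st.1 ≠ [] then st.2 ++ [st.1] else st.2

def group_into_blocks_py (config : List String) : List (List String) :=
  PySem.List.sorted (pvFinish (config.foldl pvAStep ([], []))) (fun x => x) false

-- ===== PORT B =====
-- the inner 'while j < len(rest) and rest[j].startswith(" ")' scan is takeWhile/dropWhile
-- on the tail; the outer while-loop over the shrinking 'rest' is this recursion
def pvBBlocks : List String → List (List String)
  | [] => []
  | x :: rest =>
      (x :: rest.takeWhile (fun l => PySem.Str.startswith l " ")) ::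
        pvBBlocks (rest.dropWhile (fun l => PySem.Str.startswith l " "))
termination_by l => l.length
decreasing_by
  simp only [List.length_cons]
  exact Nat.lt_succ_of_le (List.length_dropWhile_le _ _)

def group_into_blocks_py_alt (config : List String) : List (List String) :=
  PySem.List.sorted (pvBBlocks config) (fun x => x) false

-- ===== PRECONDITION & SPEC =====
def Spec_group_into_blocks_py (config : List String) (out : List (List String)) : Prop := out = group_into_blocks_py_alt config
instance (config : List String) (out : List (List String)) : Decidable (Spec_group_into_blocks_py config out) := by unfold Spec_group_into_blocks_py; infer_instance

-- ===== CLAIM (what is proved, stated in full; the proofs are below) =====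
def Claim_equal_group_into_blocks_py : Prop := ∀ (config : List String), Dom_group_into_blocks_py config → Spec_group_into_blocks_py config (group_into_blocks_py config)

-- ===== LEMMAS AND PROOFS =====

-- A's fold, started with a nonempty current group, produces exactly B's blocks of the
-- remaining lines, with the pending group extended by the leading indented lines.
theorem pvFold_eq_blocks (rest : List String) :
    ∀ (cur : List String) (groups : List (List String)), cur ≠ [] →
    pvFinish (rest.foldl pvAStep (cur, groups))
    = groups ++ ((cur ++ rest.takeWhile (fun l => PySem.Str.startswith l " ")) ::
        pvBBlocks (rest.dropWhile (fun l => PySem.Str.startswith l " "))) := by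
  induction rest with
  | nil =>
      intro cur groups h
      simp only [List.takeWhile_nil, List.dropWhile_nil, List.foldl_nil, pvBBlocks.eq_1]
      simp [pvFinish, h]
  | cons l ls ih =>
      intro cur groups h
      by_cases hsw : PySem.Chars.startswith l.toList [' ']
      · rw [List.foldl_cons, show pvAStep (cur, groups) l = (cur ++ [l], groups) by
          simp [pvAStep, hsw]]
        rw [ih (cur ++ [l]) groups (by simp)]
        rw [List.takeWhile_cons_of_pos (p := fun l => PySem.Str.startswith l " ") (by simp [hsw]),
            List.dropWhile_cons_of_pos (p := fun l => PySem.Str.startswith l " ") (by simp [hsw])]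
        simp
      · rw [List.foldl_cons, show pvAStep (cur, groups) l = ([l], groups ++ [cur]) by
          simp [pvAStep, hsw, h]]
        rw [ih [l] (groups ++ [cur]) (by simp)]
        rw [List.takeWhile_cons_of_neg (p := fun l => PySem.Str.startswith l " ") (by simp [hsw]),
            List.dropWhile_cons_of_neg (p := fun l => PySem.Str.startswith l " ") (by simp [hsw])]
        rw [pvBBlocks.eq_2]
        simp

theorem pvGroups_eq_blocks (config : List String) :
    pvFinish (config.foldl pvAStep ([], [])) = pvBBlocks config := by
  cases config with
  | nil =>
      rw [pvBBlocks.eq_1]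
      simp [pvFinish]
  | cons l ls =>
      rw [List.foldl_cons, show pvAStep ([], []) l = ([l], []) by simp [pvAStep]]
      rw [pvFold_eq_blocks ls [l] [] (by simp)]
      rw [pvBBlocks.eq_2]
      simp

-- ===== VERDICT (by name: the statement is the Claim_ definition above) =====
theorem group_into_blocks_py_spec : Claim_equal_group_into_blocks_py := by
  intro config _
  unfold Spec_group_into_blocks_py group_into_blocks_py group_into_blocks_py_alt
  rw [pvGroups_eq_blocks config]
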